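-- pv_equiv track=rewrite | github.com/ievas/capstone-1 | app.py | make_a_hint
-- ===== SOURCE A (Python) =====
-- def make_a_hint(string):
--
--     str_len = len(string)
--     hint = ""
--
--     for idx, char in enumerate(string):
--         if idx == 0:
--             hint += char
--         elif idx != (str_len-1):
--             hint += " _ "
--         else:
--             hint += string[str_len -1]
--
--     return hint
-- ===== SOURCE B (Python) =====
-- def make_a_hint(string):
--     if len(string) < 2:
--         return string
--     return string[0] + " _ " * (len(string) - 2) + string[-1]
-- ===== Notes on version B (the rewrite author's own statement) =====
-- stated objective: simpler
-- what changed: Replaces the enumerate loop with its three-way index branch by a closed-form expression: first char + ' _ ' repeated (len-2) times + last char, with a guard for strings shorter than 2.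
import Mathlib
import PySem

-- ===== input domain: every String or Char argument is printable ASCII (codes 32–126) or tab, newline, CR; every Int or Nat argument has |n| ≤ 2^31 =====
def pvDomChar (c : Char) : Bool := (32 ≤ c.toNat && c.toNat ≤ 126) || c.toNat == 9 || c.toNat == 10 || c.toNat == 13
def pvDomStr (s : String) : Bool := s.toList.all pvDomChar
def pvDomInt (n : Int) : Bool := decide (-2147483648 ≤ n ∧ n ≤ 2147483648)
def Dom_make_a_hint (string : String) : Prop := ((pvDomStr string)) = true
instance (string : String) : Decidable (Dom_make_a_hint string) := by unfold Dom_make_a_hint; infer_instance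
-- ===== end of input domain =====

-- B replaces A's enumerate loop with its three-way index branch by a closed-form
-- expression (first char ++ " _ " repeated (len-2) times ++ last char); objective: simpler.


-- ===== PORT A =====
-- The loop body of A, as a named helper (hint accumulated as List Char; PySem strings are proved on .toList).
def make_a_hint_step (string : String) (hint : List Char) (p : Int × Char) : List Char :=
  if p.1 = 0 then hint ++ [p.2]
  else if p.1 ≠ PySem.Str.len string - 1 then hint ++ " _ ".toList
  else hint ++ (PySem.Str.pyGet? string (PySem.Str.len string - 1)).toList

def make_a_hint (string : String) : String :=
  String.ofList ((PySem.List.enumerate string.toList).foldl (make_a_hint_step string) [])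

-- ===== PORT B =====
def make_a_hint_alt (string : String) : String :=
  if PySem.Str.len string < 2 then string
  else String.ofList ((PySem.Str.pyGet? string 0).toList
        ++ PySem.List.pyRepeat " _ ".toList (PySem.Str.len string - 2)
        ++ (PySem.Str.pyGet? string (-1)).toList)

-- ===== PRECONDITION & SPEC =====
def Spec_make_a_hint (string : String) (out : String) : Prop := out = make_a_hint_alt string
instance (string : String) (out : String) : Decidable (Spec_make_a_hint string out) := by unfold Spec_make_a_hint; infer_instance

-- ===== CLAIM (what is proved, stated in full; the proofs are below) =====
def Claim_equal_make_a_hint : Prop := ∀ (string : String), Dom_make_a_hint string → Spec_make_a_hint string (make_a_hint string)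

-- ===== LEMMAS AND PROOFS =====

-- A's loop body with the string-dependent data (its length L, its last-character list g) abstracted out.
def pvStepL (L : Int) (g : List Char) (hint : List Char) (p : Int × Char) : List Char :=
  if p.1 = 0 then hint ++ [p.2]
  else if p.1 ≠ L - 1 then hint ++ " _ ".toList
  else hint ++ g

theorem make_a_hint_step_eq (s : String) :
    make_a_hint_step s
      = pvStepL (PySem.Str.len s) ((PySem.Str.pyGet? s (PySem.Str.len s - 1)).toList) := rfl

-- The tail of A's loop (indices k ≥ 1): " _ " for every element but the last, then g.
theorem pv_fold_tail (L : Int) (g : List Char) (xs : List Char) :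
    ∀ (k : Int) (acc : List Char), 1 ≤ k → k + xs.length = L → xs ≠ [] →
    (PySem.List.enumerate xs k).foldl (pvStepL L g) acc
      = acc ++ (List.replicate (xs.length - 1) " _ ".toList).flatten ++ g := by
  induction xs with
  | nil => intro k acc _ _ hne; exact absurd rfl hne
  | cons x xs ih =>
    intro k acc hk hn hne
    simp only [List.length_cons] at hn
    push_cast at hn
    rw [PySem.List.enumerate_cons, List.foldl_cons]
    cases xs with
    | nil =>
      simp only [List.length_nil, Nat.cast_zero] at hn
      have hstep : pvStepL L g acc (k, x) = acc ++ g := by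
        unfold pvStepL
        rw [if_neg (by omega : ¬ (k : Int) = 0), if_neg (by omega : ¬ k ≠ L - 1)]
      rw [hstep, PySem.List.enumerate_nil, List.foldl_nil]
      simp
    | cons y ys =>
      have hstep : pvStepL L g acc (k, x) = acc ++ " _ ".toList := by
        unfold pvStepL
        have hlen : ((y :: ys).length : Int) ≥ 1 := by simp
        rw [if_neg (by omega : ¬ (k : Int) = 0), if_pos (by omega : k ≠ L - 1)]
      rw [hstep, ih (k + 1) (acc ++ " _ ".toList) (by omega)
            (by simp only [List.length_cons] at hn ⊢; push_cast at hn ⊢; omega) (by simp)]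
      simp [List.replicate_succ]

-- ===== VERDICT (by name: the statement is the Claim_ definition above) =====
theorem make_a_hint_spec : Claim_equal_make_a_hint := by
  intro s _
  unfold Spec_make_a_hint make_a_hint make_a_hint_alt
  rcases h : s.toList with _ | ⟨a, t⟩
  · -- empty string: both sides are s itself
    have hlen : PySem.Str.len s = 0 := by rw [PySem.Str.len_eq, h]; rfl
    rw [PySem.List.enumerate_nil, List.foldl_nil, if_pos (by omega),
        ← String.ofList_toList (s := s), h]
  · rcases t with _ | ⟨b, t⟩
    · -- single character: both sides are s itself
      have hlen : PySem.Str.len s = 1 := by rw [PySem.Str.len_eq, h]; rfl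
      rw [PySem.List.enumerate_cons, List.foldl_cons, PySem.List.enumerate_nil,
          List.foldl_nil, if_pos (by omega), ← String.ofList_toList (s := s), h]
      unfold make_a_hint_step
      rw [if_pos rfl, List.nil_append]
    · -- length ≥ 2
      have hlen : PySem.Str.len s = (t.length : Int) + 2 := by
        rw [PySem.Str.len_eq, h]; simp; ring
      rw [make_a_hint_step_eq, PySem.List.enumerate_cons, List.foldl_cons,
          if_neg (by omega : ¬ PySem.Str.len s < 2)]
      have h0 : pvStepL (PySem.Str.len s) ((PySem.Str.pyGet? s (PySem.Str.len s - 1)).toList)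
          [] (0, a) = [a] := by unfold pvStepL; rw [if_pos rfl, List.nil_append]
      rw [h0, pv_fold_tail (PySem.Str.len s) ((PySem.Str.pyGet? s (PySem.Str.len s - 1)).toList)
            (b :: t) (0 + 1) [a] (by omega)
            (by simp only [List.length_cons]; push_cast; omega) (by simp)]
      congr 1
      have hget0 : (PySem.Str.pyGet? s 0).toList = [a] := by
        rw [show (0 : Int) = ((0 : Nat) : Int) from rfl, PySem.Str.pyGet?_natCast, h]
        rfl
      have hlast : PySem.Str.pyGet? s (PySem.Str.len s - 1) = PySem.Str.pyGet? s (-1) := by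
        have hcast : PySem.Str.len s - 1 = ((t.length + 1 : Nat) : Int) := by push_cast; omega
        rw [hcast, PySem.Str.pyGet?_natCast]
        simp [PySem.Str.pyGet?_eq, PySem.Chars.pyGet?_eq_listPyGet?,
              PySem.List.pyGet?_neg_one, h, List.getLast?_eq_getElem?]
      have hrep : PySem.List.pyRepeat " _ ".toList (PySem.Str.len s - 2)
          = (List.replicate ((b :: t).length - 1) " _ ".toList).flatten := by
        have hcast : PySem.Str.len s - 2 = ((t.length : Nat) : Int) := by omega
        rw [hcast]
        simp [PySem.List.pyRepeat]
      rw [hget0, hlast, hrep]
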